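-- pv_equiv track=rewrite | github.com/jcmarcano/bg-ai | games/jaipur.py | getCardsCombination
-- ===== SOURCE A (Python) =====
-- import itertools
--
-- def getCardsCombination(action, option):
--     initPos = 0
--     for pos, value in enumerate(option[1]):
--         if action < value:
--             options = pos
--             break
--         else:
--             initPos = action - value
--     move = ()
--     if (options > 0):
--         for pos, combination in enumerate(itertools.combinations(range(1, option[0] + 1), options)):
--             if pos == initPos:
--                 move = combination
--                 break
--
--     return move
-- ===== SOURCE B (Python) =====
-- from math import comb
--
-- def getCardsCombination(action, option):
--     n, values = option
--     initPos = 0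
--     k = None
--     for pos, value in enumerate(values):
--         if action < value:
--             k = pos
--             break
--         initPos = action - value
--     if k == 0:
--         return ()
--     m = n if n > 0 else 0
--     if initPos >= comb(m, k):
--         return ()
--     # combinatorial number system: unrank initPos directly (lexicographic)
--     result = []
--     r = initPos
--     lo = 1
--     while k > 0:
--         c = comb(m - lo, k - 1)
--         if r < c:
--             result.append(lo)
--             k -= 1
--         else:
--             r -= c
--         lo += 1
--     return tuple(result)
-- ===== Notes on version B (the rewrite author's own statement) =====
-- stated objective: alternative
-- what changed: Instead of enumerating all combinations of range(1,n+1) one by one until the initPos-th is reached, B unranks the initPos-th lexicographic combination directly with the combinatorial number system (binomial-coefficient arithmetic), after checking the rank is in range.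
import Mathlib
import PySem

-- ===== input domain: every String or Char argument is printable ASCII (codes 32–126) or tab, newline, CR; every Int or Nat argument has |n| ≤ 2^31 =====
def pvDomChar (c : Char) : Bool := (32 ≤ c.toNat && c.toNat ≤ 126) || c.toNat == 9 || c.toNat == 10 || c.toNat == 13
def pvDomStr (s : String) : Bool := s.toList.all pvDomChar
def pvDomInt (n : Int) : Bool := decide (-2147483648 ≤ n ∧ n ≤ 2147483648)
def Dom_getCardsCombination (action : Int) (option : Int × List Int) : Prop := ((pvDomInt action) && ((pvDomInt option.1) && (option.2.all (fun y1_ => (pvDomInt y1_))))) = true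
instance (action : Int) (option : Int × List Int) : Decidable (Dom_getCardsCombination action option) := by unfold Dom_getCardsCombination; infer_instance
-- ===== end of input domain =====

-- B replaces A's linear enumeration of all combinations up to index initPos by
-- direct combinatorial-number-system unranking of the initPos-th combination.

-- ===== PORT A =====
-- first loop of A: returns (options, initPos) at the break, none if the loop falls
-- through (then Python raises NameError on 'options'; excluded by Pre_)
def pvFindA : List Int → Int → Int → Int → Option (Int × Int)
  | [], _, _, _ => none
  | v :: vs, action, initPos, pos =>
    if action < v then some (pos, initPos)
    else pvFindA vs action (action - v) (pos + 1)

-- itertools.combinations of a list, in itertools' (lexicographic) order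
def pvCombs : List Int → Nat → List (List Int)
  | _, 0 => [[]]
  | [], _ + 1 => []
  | x :: xs, k + 1 => (pvCombs xs k).map (fun c => x :: c) ++ pvCombs xs (k + 1)

-- A's second loop: enumerate combinations, break when pos == initPos
def pvScan : List (List Int) → Int → Int → List Int
  | [], _, _ => []
  | c :: cs, target, pos => if pos = target then c else pvScan cs target (pos + 1)

def getCardsCombination (action : Int) (option : Int × List Int) : List Int :=
  match pvFindA option.2 action 0 0 with
  | none => []   -- Python: NameError (outside Pre_)
  | some (options, initPos) =>
    if options > 0 then
      pvScan (pvCombs (PySem.List.pyRange 1 (option.1 + 1) 1) options.toNat) initPos 0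
    else []

-- ===== PORT B =====
-- same first loop as Source B's (identical to A's in the Python sources)
def pvFindB : List Int → Int → Int → Int → Option (Int × Int)
  | [], _, _, _ => none
  | v :: vs, action, initPos, pos =>
    if action < v then some (pos, initPos)
    else pvFindB vs action (action - v) (pos + 1)

-- math.comb(m, k) for the nonnegative arguments Source B feeds it
def pyComb (a b : Int) : Int := (Nat.choose a.toNat b.toNat : Int)

-- Source B's while loop (fuel only makes the recursion structural; Source B terminates on Pre_)
def pvLoop : Nat → Int → Int → Int → Int → List Int → List Int
  | 0, _, _, _, _, acc => acc
  | fuel + 1, r, lo, m, k, acc =>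
    if k > 0 then
      let c := pyComb (m - lo) (k - 1)
      if r < c then pvLoop fuel r (lo + 1) m (k - 1) (acc ++ [lo])
      else pvLoop fuel (r - c) (lo + 1) m k acc
    else acc

def getCardsCombination_alt (action : Int) (option : Int × List Int) : List Int :=
  match pvFindB option.2 action 0 0 with
  | none => []   -- Python: TypeError in comb (outside Pre_)
  | some (k, initPos) =>
    if k = 0 then []
    else
      let m := if option.1 > 0 then option.1 else 0
      if initPos ≥ pyComb m k then []
      else pvLoop (m.toNat + k.toNat + 1) initPos 1 m k []

-- ===== PRECONDITION & SPEC =====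
-- Pre_ excludes exactly the inputs where A's first loop never breaks: Python A then
-- raises NameError ('options' unbound).
def Pre_getCardsCombination (action : Int) (option : Int × List Int) : Prop :=
  ∃ v ∈ option.2, action < v
instance (action : Int) (option : Int × List Int) : Decidable (Pre_getCardsCombination action option) := by unfold Pre_getCardsCombination; infer_instance

def pvWitness_getCardsCombination : Int × (Int × List Int) := (2, (3, [1, 5]))

def Spec_getCardsCombination (action : Int) (option : Int × List Int) (out : List Int) : Prop := out = getCardsCombination_alt action option
instance (action : Int) (option : Int × List Int) (out : List Int) : Decidable (Spec_getCardsCombination action option out) := by unfold Spec_getCardsCombination; infer_instance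

-- ===== CLAIM (what is proved, stated in full; the proofs are below) =====
def Claim_equal_getCardsCombination : Prop := ∀ (action : Int) (option : Int × List Int), Dom_getCardsCombination action option → Pre_getCardsCombination action option → Spec_getCardsCombination action option (getCardsCombination action option)

-- ===== LEMMAS AND PROOFS =====

theorem pvFindB_eq_pvFindA : ∀ (vs : List Int) (a ip pos : Int),
    pvFindB vs a ip pos = pvFindA vs a ip pos := by
  intro vs
  induction vs with
  | nil => intro a ip pos; rfl
  | cons v vs ih =>
    intro a ip pos
    simp only [pvFindA, pvFindB]
    split_ifs with h
    · rfl
    · exact ih a (a - v) (pos + 1)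

theorem pvFindA_some_of_pre : ∀ (vs : List Int) (a ip pos : Int),
    (∃ v ∈ vs, a < v) → ∃ p, pvFindA vs a ip pos = some p := by
  intro vs
  induction vs with
  | nil => intro a ip pos h; simp at h
  | cons v vs ih =>
    intro a ip pos h
    simp only [pvFindA]
    split_ifs with hv
    · exact ⟨_, rfl⟩
    · apply ih
      rcases h with ⟨w, hw, haw⟩
      rcases List.mem_cons.mp hw with rfl | hw'
      · omega
      · exact ⟨w, hw', haw⟩

theorem pvFindA_nonneg : ∀ (vs : List Int) (a ip pos k r : Int),
    0 ≤ ip → 0 ≤ pos → pvFindA vs a ip pos = some (k, r) → 0 ≤ k ∧ 0 ≤ r := by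
  intro vs
  induction vs with
  | nil => intro a ip pos k r _ _ h; simp [pvFindA] at h
  | cons v vs ih =>
    intro a ip pos k r hip hpos h
    simp only [pvFindA] at h
    split_ifs at h with hv
    · simp at h; omega
    · exact ih a (a - v) (pos + 1) k r (by omega) (by omega) h

theorem length_pvCombs : ∀ (xs : List Int) (k : Nat),
    (pvCombs xs k).length = Nat.choose xs.length k := by
  intro xs
  induction xs with
  | nil => intro k; cases k <;> simp [pvCombs]
  | cons x xs ih =>
    intro k
    cases k with
    | zero => simp [pvCombs]
    | succ j => simp [pvCombs, ih, Nat.choose_succ_succ]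

theorem pvScan_eq_getD : ∀ (cs : List (List Int)) (pos : Int) (t : Nat),
    pvScan cs (pos + t) pos = cs.getD t [] := by
  intro cs
  induction cs with
  | nil => intro pos t; rfl
  | cons c cs ih =>
    intro pos t
    simp only [pvScan]
    cases t with
    | zero => simp
    | succ t' =>
      have hne : ¬ (pos = pos + ((t' : Int) + 1)) := by omega
      have : pos + ((t' + 1 : Nat) : Int) = (pos + 1) + (t' : Int) := by push_cast; ring
      rw [if_neg (by push_cast; omega), this, ih (pos + 1) t']
      simp [List.getD]

theorem pvLoop_eq : ∀ (meas : Nat) (m lo : Int) (kn r fuel : Nat) (acc : List Int),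
    (m + 1 - lo).toNat = meas → meas + kn ≤ fuel → r < Nat.choose meas kn →
    pvLoop fuel (r : Int) lo m (kn : Int) acc
      = acc ++ (pvCombs (PySem.List.pyRange lo (m + 1) 1) kn).getD r [] := by
  intro meas
  induction meas with
  | zero =>
    intro m lo kn r fuel acc hmeas hfuel hr
    cases kn with
    | succ j => simp [Nat.choose] at hr
    | zero =>
      have hr0 : r = 0 := by simp only [Nat.choose_zero_right] at hr; omega
      subst hr0
      cases fuel with
      | zero => simp [pvLoop, pvCombs, List.getD]
      | succ f => simp [pvLoop, pvCombs, List.getD]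
  | succ s ih =>
    intro m lo kn r fuel acc hmeas hfuel hr
    cases kn with
    | zero =>
      have hr0 : r = 0 := by simp only [Nat.choose_zero_right] at hr; omega
      subst hr0
      obtain ⟨f, rfl⟩ : ∃ f, fuel = f + 1 := ⟨fuel - 1, by omega⟩
      simp [pvLoop, pvCombs, List.getD]
    | succ j =>
      rw [Nat.choose_succ_succ] at hr
      simp only [Nat.succ_eq_add_one] at hr
      obtain ⟨f, rfl⟩ : ∃ f, fuel = f + 1 := ⟨fuel - 1, by omega⟩
      have hlo : lo < m + 1 := by omega
      have hrange := PySem.List.pyRange_one_cons hlo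
      have hml : (m - lo).toNat = s := by omega
      have hc : pyComb (m - lo) ((j + 1 : Nat) - 1 : Int) = (Nat.choose s j : Int) := by
        have : ((j + 1 : Nat) - 1 : Int) = (j : Int) := by push_cast; ring
        rw [this]; simp [pyComb, hml]
      have hrest : (PySem.List.pyRange (lo + 1) (m + 1) 1).length = s := by
        rw [PySem.List.length_pyRange_one]; omega
      have hlen : (pvCombs (PySem.List.pyRange (lo + 1) (m + 1) 1) j).length = Nat.choose s j := by
        rw [length_pvCombs, hrest]
      simp only [pvLoop]
      rw [if_pos (by push_cast; omega), hc]
      by_cases hrc : r < Nat.choose s j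
      · rw [if_pos (by exact_mod_cast hrc)]
        have : ((j + 1 : Nat) : Int) - 1 = (j : Int) := by push_cast; ring
        rw [this, ih m (lo + 1) j r f (acc ++ [lo]) (by omega) (by omega) hrc]
        rw [hrange]
        simp only [pvCombs]
        have hgl : r < ((pvCombs (PySem.List.pyRange (lo + 1) (m + 1) 1) j).map (fun c => lo :: c)).length := by
          simp [hlen, hrc]
        rw [List.getD_append _ _ _ _ hgl]
        have hr2 : r < (pvCombs (PySem.List.pyRange (lo + 1) (m + 1) 1) j).length := by
          rw [hlen]; exact hrc
        rw [List.getD_eq_getElem _ _ hgl, List.getElem_map, List.getD_eq_getElem _ _ hr2]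
        simp
      · rw [if_neg (by exact_mod_cast hrc)]
        have hcast : (r : Int) - (Nat.choose s j : Int) = ((r - Nat.choose s j : Nat) : Int) := by
          omega
        have hr' : r - Nat.choose s j < Nat.choose s (j + 1) := by
          have := Nat.choose_succ_succ s j
          omega
        rw [hcast, ih m (lo + 1) (j + 1) (r - Nat.choose s j) f acc (by omega) (by omega) hr']
        rw [hrange]
        simp only [pvCombs]
        have hgl : ((pvCombs (PySem.List.pyRange (lo + 1) (m + 1) 1) j).map (fun c => lo :: c)).length ≤ r := by
          rw [List.length_map, hlen]; omega
        rw [List.getD_append_right _ _ _ _ hgl]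
        rw [List.length_map, hlen]

theorem getCardsCombination_spec_aux : ∀ (action : Int) (option : Int × List Int),
    Pre_getCardsCombination action option →
    getCardsCombination action option = getCardsCombination_alt action option := by
  intro action opt hPre
  obtain ⟨⟨k, ip⟩, hfind⟩ := pvFindA_some_of_pre opt.2 action 0 0 hPre
  obtain ⟨hk, hip⟩ := pvFindA_nonneg opt.2 action 0 0 k ip le_rfl le_rfl hfind
  unfold getCardsCombination getCardsCombination_alt
  rw [pvFindB_eq_pvFindA, hfind]
  simp only
  by_cases hk0 : k = 0
  · subst hk0; simp
  · rw [if_pos (by omega), if_neg hk0]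
    set m : Int := if opt.1 > 0 then opt.1 else 0 with hm
    have hm0 : 0 ≤ m := by rw [hm]; split_ifs <;> omega
    have hrange_eq : PySem.List.pyRange 1 (opt.1 + 1) 1 = PySem.List.pyRange 1 (m + 1) 1 := by
      rw [hm]; split_ifs with h
      · rfl
      · rw [PySem.List.pyRange_one_eq_nil (by omega), PySem.List.pyRange_one_eq_nil (by omega)]
    rw [hrange_eq]
    have hlen : (pvCombs (PySem.List.pyRange 1 (m + 1) 1) k.toNat).length
        = Nat.choose m.toNat k.toNat := by
      rw [length_pvCombs, PySem.List.length_pyRange_one]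
      congr 1; omega
    have hip' : ip = (0 : Int) + (ip.toNat : Nat) := by omega
    rw [hip', pvScan_eq_getD]
    by_cases hbig : (0 : Int) + (ip.toNat : Nat) ≥ pyComb m k
    · rw [if_pos hbig]
      apply List.getD_eq_default
      rw [hlen]
      simp only [pyComb] at hbig
      have : k.toNat ≤ k.toNat := le_rfl
      omega
    · rw [if_neg hbig]
      have hr : ip.toNat < Nat.choose m.toNat k.toNat := by
        simp only [pyComb] at hbig; omega
      have hkk : (k.toNat : Int) = k := by omega
      have := pvLoop_eq m.toNat m 1 k.toNat ip.toNat (m.toNat + k.toNat + 1) []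
        (by omega) (by omega) hr
      rw [hkk] at this
      rw [show (0 : Int) + (ip.toNat : Nat) = ((ip.toNat : Nat) : Int) by omega, this]
      simp

-- ===== VERDICT (by name: the statement is the Claim_ definition above) =====
theorem getCardsCombination_spec : Claim_equal_getCardsCombination := by
  intro action opt _ hPre
  exact getCardsCombination_spec_aux action opt hPre
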